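-- pv_equiv track=rewrite | github.com/OCA/server-tools | base_generate_code/tests/test_code_format_mixin.py | _reverse_mask
-- ===== SOURCE A (Python) =====
-- from string import ascii_lowercase, ascii_uppercase, digits
--
-- def _reverse_mask(code):
--     reverse_mask = ""
--     for car in code:
--         if car in ascii_uppercase:
--             reverse_mask += "X"
--         elif car in ascii_lowercase:
--             reverse_mask += "x"
--         elif car in digits:
--             reverse_mask += "0"
--         else:
--             reverse_mask += car
--     return reverse_mask
-- ===== SOURCE B (Python) =====
-- from string import ascii_lowercase, ascii_uppercase, digits
--
-- def _reverse_mask(code):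
--     # Staged whole-string passes: each uppercase letter is replaced by "X",
--     # each lowercase letter by "x", each digit by "0"; everything else is
--     # untouched. Correct because the three classes are disjoint and the
--     # replacement characters "X", "x", "0" are fixed points of the later
--     # passes that could see them.
--     for c in ascii_uppercase:
--         code = code.replace(c, "X")
--     for c in ascii_lowercase:
--         code = code.replace(c, "x")
--     for c in digits:
--         code = code.replace(c, "0")
--     return code
-- ===== Notes on version B (the rewrite author's own statement) =====
-- stated objective: alternative
-- what changed: Replaces the single per-character loop with a four-way membership branch by 62 staged whole-string str.replace passes (one per uppercase letter, lowercase letter and digit), with no per-character branching; correct because the classes are disjoint and the replacements 'X','x','0' are fixed points of later passes.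
import Mathlib
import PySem

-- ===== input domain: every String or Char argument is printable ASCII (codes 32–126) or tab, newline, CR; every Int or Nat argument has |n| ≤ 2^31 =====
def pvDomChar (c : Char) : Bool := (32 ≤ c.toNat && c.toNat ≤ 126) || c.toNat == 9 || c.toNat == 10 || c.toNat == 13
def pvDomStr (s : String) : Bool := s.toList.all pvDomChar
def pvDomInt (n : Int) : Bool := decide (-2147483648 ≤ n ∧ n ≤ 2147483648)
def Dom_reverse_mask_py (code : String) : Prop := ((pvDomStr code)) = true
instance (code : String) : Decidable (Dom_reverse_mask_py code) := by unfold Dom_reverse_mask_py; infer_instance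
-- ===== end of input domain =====

-- B replaces A's per-character four-way-branch loop by 62 staged whole-string
-- replace passes (one per ASCII letter/digit), with no per-character branching.

-- ===== PORT A =====
def pvUpper : List Char := "ABCDEFGHIJKLMNOPQRSTUVWXYZ".toList
def pvLower : List Char := "abcdefghijklmnopqrstuvwxyz".toList
def pvDigits : List Char := "0123456789".toList

def reverse_mask_py (code : String) : String :=
  String.ofList (code.toList.foldl (fun acc car =>
    if pvUpper.contains car then acc ++ ['X']
    else if pvLower.contains car then acc ++ ['x']
    else if pvDigits.contains car then acc ++ ['0']
    else acc ++ [car]) [])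

-- ===== PORT B =====
-- code.replace(c, "X") for every uppercase c, then "x" for lowercase, then "0" for digits
def reverse_mask_py_alt (code : String) : String :=
  let s1 := pvUpper.foldl (fun s c => PySem.Str.replace s (String.ofList [c]) "X") code
  let s2 := pvLower.foldl (fun s c => PySem.Str.replace s (String.ofList [c]) "x") s1
  pvDigits.foldl (fun s c => PySem.Str.replace s (String.ofList [c]) "0") s2

-- ===== PRECONDITION & SPEC =====
def Spec_reverse_mask_py (code : String) (out : String) : Prop := out = reverse_mask_py_alt code
instance (code : String) (out : String) : Decidable (Spec_reverse_mask_py code out) := by unfold Spec_reverse_mask_py; infer_instance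

-- ===== CLAIM (what is proved, stated in full; the proofs are below) =====
def Claim_equal_reverse_mask_py : Prop := ∀ (code : String), Dom_reverse_mask_py code → Spec_reverse_mask_py code (reverse_mask_py code)

-- ===== LEMMAS AND PROOFS =====

-- replace with a single-character pattern, on the fuelled helper
theorem pvGo_single (a b : Char) : ∀ (l : List Char) (fuel : Nat) (acc : List Char), l.length ≤ fuel →
    PySem.Chars.replace.go [a] [b] fuel l acc
      = acc.reverse ++ l.map (fun c => if c = a then b else c) := by
  intro l
  induction l with
  | nil => intro fuel acc _; cases fuel <;> simp [PySem.Chars.replace.go]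
  | cons c t ih =>
    intro fuel acc h
    cases fuel with
    | zero => simp at h
    | succ f =>
      simp only [PySem.Chars.replace.go]
      by_cases hc : c = a
      · subst hc
        simpa [List.isPrefixOf] using ih f (b :: acc) (by simpa using h)
      · simpa [List.isPrefixOf, hc, Ne.symm hc] using ih f (c :: acc) (by simpa using h)

-- s.replace(a, b) for single characters is the pointwise substitution
theorem pvReplace_single (a b : Char) (s : List Char) :
    PySem.Chars.replace s [a] [b] = s.map (fun c => if c = a then b else c) := by
  simp [PySem.Chars.replace, pvGo_single a b s s.length [] le_rfl]

-- pointwise substitution: x ↦ r when x is one of cs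
def pvSub (cs : List Char) (r : Char) (x : Char) : Char := if cs.contains x then r else x

-- a pass of single-char replaces over a list of patterns, seen on toList
theorem pvFold_replace (cs : List Char) (r : Char) : ∀ (s : String),
    (cs.foldl (fun s c => PySem.Str.replace s (String.ofList [c]) (String.ofList [r])) s).toList
      = s.toList.map (pvSub cs r) := by
  induction cs with
  | nil =>
    intro s
    rw [List.foldl_nil, show pvSub [] r = id from funext fun x => by simp [pvSub], List.map_id]
  | cons c cs ih =>
    intro s
    rw [List.foldl_cons, ih]
    have hrep : (PySem.Str.replace s (String.ofList [c]) (String.ofList [r])).toList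
        = s.toList.map (fun x => if x = c then r else x) := by
      simp [PySem.Str.replace, String.toList_ofList, pvReplace_single]
    rw [hrep, List.map_map]
    apply List.map_congr_left
    intro x _
    simp only [Function.comp, pvSub]
    by_cases hx : x = c
    · subst hx
      by_cases hm : cs.contains x <;> simp
    · by_cases hm : cs.contains x <;> simp [hx]

-- A's per-character result, factored out of its loop body
def pvAStep (c : Char) : Char :=
  if pvUpper.contains c then 'X'
  else if pvLower.contains c then 'x'
  else if pvDigits.contains c then '0'
  else c

-- B's per-character result: the composite of the three staged substitutions
def pvBStep (c : Char) : Char :=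
  pvSub pvDigits '0' (pvSub pvLower 'x' (pvSub pvUpper 'X' c))

-- the two per-character functions agree on every code point below 128 (kernel check)
set_option maxRecDepth 4096 in
theorem pvStep_eq_lt128 : ∀ n < 128, pvAStep (Char.ofNat n) = pvBStep (Char.ofNat n) := by decide

theorem pvStep_eq (c : Char) (h : pvDomChar c = true) : pvAStep c = pvBStep c := by
  have hlt : c.toNat < 128 := by
    simp [pvDomChar] at h
    omega
  have := pvStep_eq_lt128 c.toNat hlt
  rwa [Char.ofNat_toNat] at this

-- ===== VERDICT (by name: the statement is the Claim_ definition above) =====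
set_option maxRecDepth 8192 in
theorem reverse_mask_py_spec : Claim_equal_reverse_mask_py := by
  intro code hdom
  unfold Spec_reverse_mask_py
  have hB : (reverse_mask_py_alt code).toList = code.toList.map pvBStep := by
    unfold reverse_mask_py_alt
    rw [show ("X" : String) = String.ofList ['X'] from rfl,
        show ("x" : String) = String.ofList ['x'] from rfl,
        show ("0" : String) = String.ofList ['0'] from rfl]
    rw [pvFold_replace, pvFold_replace, pvFold_replace, List.map_map, List.map_map]
    apply List.map_congr_left
    intro x _
    simp only [Function.comp_apply]
    unfold pvBStep
    rfl
  have hA : reverse_mask_py code = String.ofList (code.toList.map pvAStep) := by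
    unfold reverse_mask_py
    refine congrArg String.ofList ?_
    have hfun : (fun (acc : List Char) car =>
        if pvUpper.contains car then acc ++ ['X']
        else if pvLower.contains car then acc ++ ['x']
        else if pvDigits.contains car then acc ++ ['0']
        else acc ++ [car]) = (fun acc car => acc ++ [pvAStep car]) := by
      funext acc c
      unfold pvAStep
      split_ifs <;> rfl
    rw [hfun, PySem.List.foldl_append_singleton_eq_map, List.nil_append]
  have hmap : code.toList.map pvAStep = code.toList.map pvBStep := by
    apply List.map_congr_left
    intro c hc
    exact pvStep_eq c (by
      have := hdom
      unfold Dom_reverse_mask_py pvDomStr at this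
      exact List.all_eq_true.mp this c hc)
  have : (reverse_mask_py code).toList = (reverse_mask_py_alt code).toList := by
    rw [hA, hB, ← hmap, String.toList_ofList]
  exact String.toList_injective this
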